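-- pv_equiv track=rewrite | github.com/ponir-techlogicians/lovecompatability | app/utils.py | split_names_into_6
-- ===== SOURCE A (Python) =====
-- def split_names_into_6(name1: str, name2: str) -> list:
--     """Split both names and interleave up to 3 parts each to get 6 tokens."""
--     parts1 = name1.split()
--     parts2 = name2.split()
--
--     merged = []
--     for i in range(3):
--         if i < len(parts1):
--             merged.append(parts1[i])
--         else:
--             merged.append("_")
--         if i < len(parts2):
--             merged.append(parts2[i])
--         else:
--             merged.append("_")
--     return merged
-- ===== SOURCE B (Python) =====
-- def split_names_into_6(name1: str, name2: str) -> list: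
--     """Split both names and interleave up to 3 parts each to get 6 tokens."""
--     def merge(p1, p2, k):
--         if k == 0:
--             return []
--         a, rest1 = (p1[0], p1[1:]) if p1 else ("_", [])
--         b, rest2 = (p2[0], p2[1:]) if p2 else ("_", [])
--         return [a, b] + merge(rest1, rest2, k - 1)
--     return merge(name1.split(), name2.split(), 3)
-- ===== Notes on version B (the rewrite author's own statement) =====
-- stated objective: alternative
-- what changed: B replaces A's indexed range(3) loop with per-index length checks by a recursive merge that alternately consumes the heads of the two word lists, emitting '_' when a list is exhausted; no indexing or length comparisons remain.
import Mathlib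
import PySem

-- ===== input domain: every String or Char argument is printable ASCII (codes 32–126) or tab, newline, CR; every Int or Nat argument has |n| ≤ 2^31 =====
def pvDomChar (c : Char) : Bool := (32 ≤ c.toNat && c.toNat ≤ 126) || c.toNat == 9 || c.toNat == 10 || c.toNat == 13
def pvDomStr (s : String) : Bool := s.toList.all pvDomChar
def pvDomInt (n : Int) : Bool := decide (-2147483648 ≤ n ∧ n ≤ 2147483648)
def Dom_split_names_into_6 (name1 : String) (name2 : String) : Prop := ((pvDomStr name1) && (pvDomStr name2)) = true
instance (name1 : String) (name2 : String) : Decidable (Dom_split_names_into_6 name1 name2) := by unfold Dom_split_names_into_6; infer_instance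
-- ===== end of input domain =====

-- Header: B replaces A's indexed range(3) loop by a recursive merge consuming the heads of the two word lists, padding with "_"; same return value (objective: alternative decomposition).

-- ===== PORT A =====
def split_names_into_6 (name1 : String) (name2 : String) : List String :=
  let parts1 := PySem.Str.split₀ name1
  let parts2 := PySem.Str.split₀ name2
  (PySem.List.pyRange 0 3 1).foldl (fun merged i =>
    let merged := merged ++ [if i < (parts1.length : Int) then (PySem.List.pyGet? parts1 i).getD "_" else "_"]
    merged ++ [if i < (parts2.length : Int) then (PySem.List.pyGet? parts2 i).getD "_" else "_"]) []

-- ===== PORT B =====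
-- recursive merge: pop the head of each list (or "_" if empty), recurse with fuel k
def mergePad : List String → List String → Nat → List String
  | _, _, 0 => []
  | p1, p2, k + 1 =>
    let ar1 : String × List String := match p1 with | [] => ("_", []) | x :: t => (x, t)
    let br2 : String × List String := match p2 with | [] => ("_", []) | y :: t => (y, t)
    [ar1.1, br2.1] ++ mergePad ar1.2 br2.2 k

def split_names_into_6_alt (name1 : String) (name2 : String) : List String :=
  mergePad (PySem.Str.split₀ name1) (PySem.Str.split₀ name2) 3

-- ===== PRECONDITION & SPEC =====
def Spec_split_names_into_6 (name1 : String) (name2 : String) (out : List String) : Prop := out = split_names_into_6_alt name1 name2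
instance (name1 : String) (name2 : String) (out : List String) : Decidable (Spec_split_names_into_6 name1 name2 out) := by unfold Spec_split_names_into_6; infer_instance

-- ===== CLAIM (what is proved, stated in full; the proofs are below) =====
def Claim_equal_split_names_into_6 : Prop := ∀ (name1 : String) (name2 : String), Dom_split_names_into_6 name1 name2 → Spec_split_names_into_6 name1 name2 (split_names_into_6 name1 name2)

-- ===== LEMMAS AND PROOFS =====
lemma tok (l : List String) (i : Int) (hi : 0 ≤ i) :
    (if i < (l.length : Int) then (PySem.List.pyGet? l i).getD "_" else "_") = l.getD i.toNat "_" := by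
  by_cases h : i < (l.length : Int)
  · rw [if_pos h, PySem.List.pyGet?_of_nonneg (h := hi)]
    have ht : i.toNat < l.length := by omega
    simp [List.getD, ht]
  · rw [if_neg h]
    have ht : l.length ≤ i.toNat := by omega
    simp [List.getD, List.getElem?_eq_none ht]

lemma key (l1 l2 : List String) :
    (PySem.List.pyRange 0 3 1).foldl (fun merged i =>
      let merged := merged ++ [if i < (l1.length : Int) then (PySem.List.pyGet? l1 i).getD "_" else "_"]
      merged ++ [if i < (l2.length : Int) then (PySem.List.pyGet? l2 i).getD "_" else "_"]) []
    = mergePad l1 l2 3 := by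
  have hr : PySem.List.pyRange 0 3 1 = [0, 1, 2] := by decide
  rw [hr]
  simp only [List.foldl]
  rw [tok l1 0 (by norm_num), tok l2 0 (by norm_num), tok l1 1 (by norm_num),
    tok l2 1 (by norm_num), tok l1 2 (by norm_num), tok l2 2 (by norm_num)]
  rcases l1 with _ | ⟨a, _ | ⟨b, _ | ⟨c, t⟩⟩⟩ <;>
    rcases l2 with _ | ⟨x, _ | ⟨y, _ | ⟨z, s⟩⟩⟩ <;>
    simp [mergePad, List.getD]

-- ===== VERDICT (by name: the statement is the Claim_ definition above) =====
theorem split_names_into_6_spec : Claim_equal_split_names_into_6 := by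
  intro name1 name2 _
  show split_names_into_6 name1 name2 = split_names_into_6_alt name1 name2
  simpa [split_names_into_6, split_names_into_6_alt] using
    key (PySem.Str.split₀ name1) (PySem.Str.split₀ name2)
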